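-- pv_equiv track=rewrite | github.com/zerox029/amaterasu | amaterasu/metrics.py | false_positive_count
-- ===== SOURCE A (Python) =====
-- def false_positive_count(predictions, labels, class_id: int) -> int:
--     """Get the number of samples predicted as class_id that were actually of a different class"""
--     false_positives = 0
--
--     for idx, prediction in enumerate(predictions):
--         if prediction != class_id:
--             continue
--
--         if prediction != labels[idx]:
--             false_positives += 1
--
--     return false_positives
-- ===== SOURCE B (Python) =====
-- def false_positive_count(predictions, labels, class_id: int) -> int:
--     """Inclusion-exclusion: predictions of class_id minus true positives."""
--     predicted_count = sum(1 for p in predictions if p == class_id)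
--     true_positive_count = sum(
--         1 for idx, p in enumerate(predictions)
--         if p == class_id and labels[idx] == class_id
--     )
--     return predicted_count - true_positive_count
-- ===== Notes on version B (the rewrite author's own statement) =====
-- stated objective: alternative
-- what changed: Replaces the single loop with a per-element mismatch test by an inclusion-exclusion decomposition: count all predictions of class_id in one pass over predictions only, count true positives in a second pass, and return the difference.
import Mathlib
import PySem

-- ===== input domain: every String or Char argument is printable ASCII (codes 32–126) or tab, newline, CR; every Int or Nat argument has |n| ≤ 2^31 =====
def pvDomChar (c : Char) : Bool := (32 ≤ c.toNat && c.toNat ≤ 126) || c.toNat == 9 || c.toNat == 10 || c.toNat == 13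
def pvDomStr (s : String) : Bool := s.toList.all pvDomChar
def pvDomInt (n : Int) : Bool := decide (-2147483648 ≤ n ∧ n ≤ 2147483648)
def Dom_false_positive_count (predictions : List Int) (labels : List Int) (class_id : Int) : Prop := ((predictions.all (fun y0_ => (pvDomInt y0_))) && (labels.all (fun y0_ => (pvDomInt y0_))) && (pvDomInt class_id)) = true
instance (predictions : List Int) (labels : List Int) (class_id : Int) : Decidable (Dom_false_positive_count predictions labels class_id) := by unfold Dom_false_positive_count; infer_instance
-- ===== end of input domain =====

-- B replaces A's single loop with mismatch test by two counting passes and a subtraction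
-- (inclusion-exclusion): same cost, different decomposition. Return-value equivalence only.

-- ===== PORT A =====
-- Single loop over enumerate(predictions); labels[idx] is only read when
-- prediction == class_id; the 'none' branch of pyGet? (Python IndexError) is excluded by Pre_.
def false_positive_count (predictions : List Int) (labels : List Int) (class_id : Int) : Int :=
  (PySem.List.enumerate predictions 0).foldl
    (fun fp ip =>
      if ip.2 ≠ class_id then fp
      else
        match PySem.List.pyGet? labels ip.1 with
        | none => fp          -- Python raises IndexError here; unreachable under Pre_
        | some l => if ip.2 ≠ l then fp + 1 else fp)
    0

-- ===== PORT B =====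
def false_positive_count_alt (predictions : List Int) (labels : List Int) (class_id : Int) : Int :=
  let predicted_count : Int := (predictions.filter (fun p => p == class_id)).length
  let true_positive_count : Int :=
    ((PySem.List.enumerate predictions 0).filter
      (fun ip => ip.2 == class_id && PySem.List.pyGet? labels ip.1 == some class_id)).length
  predicted_count - true_positive_count

-- ===== PRECONDITION & SPEC =====
-- Pre_ excludes exactly the inputs where A raises IndexError: some prediction equal to
-- class_id sits at an index outside labels.
def Pre_false_positive_count (predictions : List Int) (labels : List Int) (class_id : Int) : Prop :=
  ∀ ip ∈ PySem.List.enumerate predictions 0, ip.2 = class_id → ip.1 < (labels.length : Int)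

instance (predictions : List Int) (labels : List Int) (class_id : Int) : Decidable (Pre_false_positive_count predictions labels class_id) := by unfold Pre_false_positive_count; infer_instance

def pvWitness_false_positive_count : List Int × List Int × Int := ([1, 2, 1, 0], [1, 1, 0, 0], 1)

def Spec_false_positive_count (predictions : List Int) (labels : List Int) (class_id : Int) (out : Int) : Prop := out = false_positive_count_alt predictions labels class_id
instance (predictions : List Int) (labels : List Int) (class_id : Int) (out : Int) : Decidable (Spec_false_positive_count predictions labels class_id out) := by unfold Spec_false_positive_count; infer_instance

-- ===== CLAIM (what is proved, stated in full; the proofs are below) =====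
def Claim_equal_false_positive_count : Prop := ∀ (predictions : List Int) (labels : List Int) (class_id : Int), Dom_false_positive_count predictions labels class_id → Pre_false_positive_count predictions labels class_id → Spec_false_positive_count predictions labels class_id (false_positive_count predictions labels class_id)

-- ===== LEMMAS AND PROOFS =====

theorem fp_foldl_eq (labels : List Int) (class_id : Int) :
    ∀ (xs : List Int) (n acc : Int),
      (∀ ip ∈ PySem.List.enumerate xs n, ip.2 = class_id →
        ∃ l, PySem.List.pyGet? labels ip.1 = some l) →
      (PySem.List.enumerate xs n).foldl
        (fun fp ip =>
          if ip.2 ≠ class_id then fp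
          else
            match PySem.List.pyGet? labels ip.1 with
            | none => fp
            | some l => if ip.2 ≠ l then fp + 1 else fp)
        acc
      = acc + ((xs.filter (fun p => p == class_id)).length : Int)
          - (((PySem.List.enumerate xs n).filter
              (fun ip => ip.2 == class_id && PySem.List.pyGet? labels ip.1 == some class_id)).length : Int) := by
  intro xs
  induction xs with
  | nil => intro n acc _; simp [PySem.List.enumerate_nil]
  | cons x xs ih =>
    intro n acc h
    have hsub : ∀ ip ∈ PySem.List.enumerate xs (n+1), ip.2 = class_id →
        ∃ l, PySem.List.pyGet? labels ip.1 = some l := by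
      intro ip hip hc
      exact h ip (by rw [PySem.List.enumerate_cons]; exact List.mem_cons_of_mem _ hip) hc
    rw [PySem.List.enumerate_cons]
    simp only [List.foldl_cons, List.filter_cons]
    by_cases hx : x = class_id
    · obtain ⟨l, hl⟩ := h (n, x) (by rw [PySem.List.enumerate_cons]; exact List.mem_cons_self) hx
      subst hx
      simp only [ne_eq, not_true_eq_false, if_false, hl] at *
      by_cases htp : l = x
      · subst htp
        simp only [not_true_eq_false, if_false, beq_self_eq_true, Bool.true_and, if_true, List.length_cons]
        rw [ih (n+1) acc hsub]
        push_cast; ring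
      · have hne : x ≠ l := fun hh => htp hh.symm
        simp only [hne, not_false_eq_true, if_true, beq_self_eq_true, Bool.true_and]
        have : (some l == some x) = false := by simp; exact htp
        simp only [this, Bool.false_eq_true, if_false, List.length_cons]
        rw [ih (n+1) (acc+1) hsub]
        push_cast; ring
    · have h1 : (x == class_id) = false := by simp [hx]
      simp only [ne_eq, hx, not_false_eq_true, if_true, h1, Bool.false_and,
        Bool.false_eq_true, if_false]
      exact ih (n+1) acc hsub
-- ===== VERDICT (by name: the statement is the Claim_ definition above) =====
theorem false_positive_count_spec : Claim_equal_false_positive_count := by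
  intro predictions labels class_id _ hpre
  unfold Spec_false_positive_count false_positive_count false_positive_count_alt
  rw [fp_foldl_eq]
  · push_cast; ring
  · intro ip hip hc
    have hlt := hpre ip hip hc
    obtain ⟨k, hk, rfl⟩ := (PySem.List.mem_enumerate_iff _ _ _).mp hip
    simp only [zero_add] at hlt ⊢
    have hk' : k < labels.length := by exact_mod_cast hlt
    rw [PySem.List.pyGet?_natCast]
    exact ⟨labels[k], List.getElem?_eq_getElem hk'⟩
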